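-- pv_equiv track=rewrite | github.com/UIC-InDeXLab/HIRA | benchmark_area/quick_pruning/clusterings/subspace_kcenter_ball.py | _split_contiguous
-- ===== SOURCE A (Python) =====
-- def _split_contiguous(D: int, S: int) -> list[tuple[int, int]]:
--     """Contiguous slices: [0:d, d:2d, ...]."""
--     sub_dim = D // S
--     remainder = D % S
--     slices = []
--     offset = 0
--     for s in range(S):
--         sd = sub_dim + (1 if s < remainder else 0)
--         slices.append((offset, offset + sd))
--         offset += sd
--     return slices
-- ===== SOURCE B (Python) =====
-- def _split_contiguous(D: int, S: int) -> list[tuple[int, int]]: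
--     """Contiguous slices: [0:d, d:2d, ...]."""
--     sub_dim = D // S
--     remainder = D % S
--     return [(s * sub_dim + min(s, remainder),
--              (s + 1) * sub_dim + min(s + 1, remainder))
--             for s in range(S)]
-- ===== Notes on version B (the rewrite author's own statement) =====
-- stated objective: alternative
-- what changed: Replaces the running-offset accumulator loop with a comprehension computing each slice's endpoints independently via the closed-form boundary s*sub_dim + min(s, remainder).
import Mathlib
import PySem

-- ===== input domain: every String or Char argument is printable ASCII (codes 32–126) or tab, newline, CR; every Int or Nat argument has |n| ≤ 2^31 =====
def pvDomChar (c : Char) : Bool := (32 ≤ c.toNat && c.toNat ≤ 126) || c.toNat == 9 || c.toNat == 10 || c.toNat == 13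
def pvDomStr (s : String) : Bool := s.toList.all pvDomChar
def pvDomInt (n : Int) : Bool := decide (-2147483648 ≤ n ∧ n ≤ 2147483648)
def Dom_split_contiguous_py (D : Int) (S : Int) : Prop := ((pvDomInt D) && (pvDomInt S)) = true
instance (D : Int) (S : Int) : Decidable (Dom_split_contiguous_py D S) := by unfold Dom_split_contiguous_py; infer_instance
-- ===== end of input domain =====

-- B replaces A's running-offset accumulator with a closed-form boundary formula per slice (alternative decomposition, same cost).

-- ===== PORT A =====
def split_contiguous_py (D : Int) (S : Int) : List (Int × Int) :=
  let sub_dim := PySem.Int.floordiv D S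
  let remainder := PySem.Int.mod D S
  let r := (PySem.List.pyRange 0 S 1).foldl
    (fun (st : List (Int × Int) × Int) s =>
      let sd := sub_dim + (if s < remainder then (1 : Int) else 0)
      (st.1 ++ [(st.2, st.2 + sd)], st.2 + sd)) ([], 0)
  r.1

-- ===== PORT B =====
def split_contiguous_py_alt (D : Int) (S : Int) : List (Int × Int) :=
  let sub_dim := PySem.Int.floordiv D S
  let remainder := PySem.Int.mod D S
  (PySem.List.pyRange 0 S 1).map (fun s =>
    (s * sub_dim + min s remainder, (s + 1) * sub_dim + min (s + 1) remainder))

-- ===== PRECONDITION & SPEC =====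
-- Pre_ excludes only S = 0, where Python A raises ZeroDivisionError at D // S (B raises there too).
def Pre_split_contiguous_py (D : Int) (S : Int) : Prop := S ≠ 0
instance (D : Int) (S : Int) : Decidable (Pre_split_contiguous_py D S) := by unfold Pre_split_contiguous_py; infer_instance
def pvWitness_split_contiguous_py : Int × Int := (10, 3)
def Spec_split_contiguous_py (D : Int) (S : Int) (out : List (Int × Int)) : Prop := out = split_contiguous_py_alt D S
instance (D : Int) (S : Int) (out : List (Int × Int)) : Decidable (Spec_split_contiguous_py D S out) := by unfold Spec_split_contiguous_py; infer_instance

-- ===== CLAIM (what is proved, stated in full; the proofs are below) =====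
def Claim_equal_split_contiguous_py : Prop := ∀ (D : Int) (S : Int), Dom_split_contiguous_py D S → Pre_split_contiguous_py D S → Spec_split_contiguous_py D S (split_contiguous_py D S)

-- ===== LEMMAS AND PROOFS =====

-- Loop invariant: after folding over range(0, n), the accumulated list is B's map over the
-- same range and the running offset equals the closed-form boundary n*sub + min n rem.
theorem split_fold_invariant (sub rem : Int) (hrem : 0 ≤ rem) (n : Nat) :
    (PySem.List.pyRange 0 n 1).foldl
      (fun (st : List (Int × Int) × Int) s =>
        let sd := sub + (if s < rem then (1 : Int) else 0)
        (st.1 ++ [(st.2, st.2 + sd)], st.2 + sd)) ([], 0)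
    = ((PySem.List.pyRange 0 n 1).map (fun s =>
        (s * sub + min s rem, (s + 1) * sub + min (s + 1) rem)),
       n * sub + min (n : Int) rem) := by
  induction n with
  | zero => simp [PySem.List.pyRange_one_eq_nil, hrem]
  | succ k ih =>
      rw [show ((k + 1 : Nat) : Int) = (k : Int) + 1 by push_cast; ring,
        PySem.List.pyRange_one_succ_right (by positivity)]
      rw [List.foldl_append, List.map_append, ih]
      simp only [List.foldl_cons, List.foldl_nil, List.map_cons, List.map_nil, Prod.mk.injEq,
        List.append_cancel_left_eq, List.cons.injEq, and_true]
      by_cases hk : (k : Int) < rem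
      · have h1 : min (k : Int) rem = k := by omega
        have h2 : min ((k : Int) + 1) rem = (k : Int) + 1 := by omega
        rw [h1, h2]; constructor
        · constructor <;> [trivial; (simp [hk]; ring)]
        · simp [hk]; ring
      · have h1 : min (k : Int) rem = rem := by omega
        have h2 : min ((k : Int) + 1) rem = rem := by omega
        rw [h1, h2]; constructor
        · constructor <;> [trivial; (simp [hk]; ring)]
        · simp [hk]; ring

-- ===== VERDICT (by name: the statement is the Claim_ definition above) =====
theorem split_contiguous_py_spec : Claim_equal_split_contiguous_py := by
  intro D S _ hS0
  unfold Spec_split_contiguous_py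
  show split_contiguous_py D S = split_contiguous_py_alt D S
  by_cases hS : 0 < S
  · have hrem : 0 ≤ PySem.Int.mod D S := PySem.Int.mod_nonneg D hS
    have hn : ((S.toNat : Nat) : Int) = S := by omega
    show ((PySem.List.pyRange 0 S 1).foldl
        (fun (st : List (Int × Int) × Int) s =>
          let sd := PySem.Int.floordiv D S + (if s < PySem.Int.mod D S then (1 : Int) else 0)
          (st.1 ++ [(st.2, st.2 + sd)], st.2 + sd)) ([], 0)).1
      = (PySem.List.pyRange 0 S 1).map (fun s =>
          (s * PySem.Int.floordiv D S + min s (PySem.Int.mod D S),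
           (s + 1) * PySem.Int.floordiv D S + min (s + 1) (PySem.Int.mod D S)))
    rw [← hn, split_fold_invariant _ _ (hn ▸ hrem) S.toNat]
  · unfold split_contiguous_py split_contiguous_py_alt
    rw [PySem.List.pyRange_one_eq_nil (by omega)]
    simp
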